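-- pv_equiv track=rewrite | github.com/1C-Migration-Lab/1c-ast-builder | ast_create/grammar/grammar_manager.py | _get_line_col
-- ===== SOURCE A (Python) =====
-- from typing import Dict, List, Optional, Set, Tuple, Union
--
-- def _get_line_col(text: str, pos: int) -> Tuple[int, int]:
--     """
--     Преобразует позицию в тексте в номер строки и столбца.
--
--     Args:
--         text: Текст для анализа.
--         pos: Позиция в тексте.
--
--     Returns:
--         Tuple[int, int]: Номер строки и столбца.
--     """
--     # Находим начала строк
--     line_starts = [0]
--     for i, c in enumerate(text):
--         if c == "\n":
--             line_starts.append(i + 1)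
--
--     # Находим номер строки
--     line = 1
--     for i, start in enumerate(line_starts[1:], 1):
--         if pos < start:
--             line = i
--             break
--         else:
--             line = i + 1
--
--     # Находим номер столбца
--     column = pos - line_starts[line - 1] + 1
--
--     return line, column
-- ===== SOURCE B (Python) =====
-- def _get_line_col(text: str, pos: int):
--     """Single pass: track current line and start-of-line while scanning up to pos."""
--     line = 1
--     last_start = 0
--     for i, c in enumerate(text):
--         if i >= pos:
--             break
--         if c == "\n":
--             line += 1
--             last_start = i + 1
--     return line, pos - last_start + 1
-- ===== Notes on version B (the rewrite author's own statement) =====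
-- stated objective: simpler
-- what changed: Replaces A's two phases (build the full list of line starts, then linearly search it and index back into it) with a single scan that stops at pos while maintaining the current line number and the last line start.
import Mathlib
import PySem

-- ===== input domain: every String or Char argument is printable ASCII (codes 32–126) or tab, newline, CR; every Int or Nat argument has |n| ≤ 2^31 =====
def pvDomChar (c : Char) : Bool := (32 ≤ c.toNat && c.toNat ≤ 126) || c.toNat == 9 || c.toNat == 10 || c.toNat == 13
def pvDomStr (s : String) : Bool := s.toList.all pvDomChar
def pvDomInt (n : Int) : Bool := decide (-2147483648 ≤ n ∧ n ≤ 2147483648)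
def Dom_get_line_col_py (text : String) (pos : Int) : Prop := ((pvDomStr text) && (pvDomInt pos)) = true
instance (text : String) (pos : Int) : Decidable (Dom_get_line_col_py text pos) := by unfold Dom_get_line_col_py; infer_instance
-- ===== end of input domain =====

-- B replaces A's two phases (build the list of all line starts, then search it and index
-- back into it) by a single scan up to pos maintaining the current line and last line start
-- (objective: simpler; same asymptotic cost).

-- ===== PORT A =====

-- first loop of A: collects i+1 for every '\n' at index i (the tail line_starts[1:];
-- the Python list starts as [0], so line_starts = 0 :: this)
def pvBuildStarts : List Char → Int → List Int
  | [], _ => []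
  | c :: r, i => if c = '\n' then (i + 1) :: pvBuildStarts r (i + 1) else pvBuildStarts r (i + 1)

-- second loop of A over enumerate(line_starts[1:], 1): `if pos < start: line = i; break
-- else: line = i + 1`; the running `line` at loop exit is exactly the current index i
def pvFindLine (pos : Int) : List Int → Int → Int
  | [], line => line
  | s :: rest, line => if pos < s then line else pvFindLine pos rest (line + 1)

def get_line_col_py (text : String) (pos : Int) : Int × Int :=
  let starts := pvBuildStarts text.toList 0
  let line := pvFindLine pos starts 1
  -- line_starts[line - 1]: 1 ≤ line ≤ len(line_starts), so the index is always in range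
  -- and the `getD 0` default is never used
  let column := pos - (PySem.List.pyGet? ((0 : Int) :: starts) (line - 1)).getD 0 + 1
  (line, column)

-- ===== PORT B =====

-- B's single loop: break as soon as i >= pos, else bump line / last_start on '\n'
def pvScan (pos : Int) : List Char → Int → Int → Int → Int × Int
  | [], _, line, last => (line, last)
  | c :: r, i, line, last =>
      if pos ≤ i then (line, last)
      else if c = '\n' then pvScan pos r (i + 1) (line + 1) (i + 1)
      else pvScan pos r (i + 1) line last

def get_line_col_py_alt (text : String) (pos : Int) : Int × Int :=
  let p := pvScan pos text.toList 0 1 0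
  (p.1, pos - p.2 + 1)

-- ===== PRECONDITION & SPEC =====
def Spec_get_line_col_py (text : String) (pos : Int) (out : Int × Int) : Prop := out = get_line_col_py_alt text pos
instance (text : String) (pos : Int) (out : Int × Int) : Decidable (Spec_get_line_col_py text pos out) := by unfold Spec_get_line_col_py; infer_instance

-- ===== CLAIM (what is proved, stated in full; the proofs are below) =====
def Claim_equal_get_line_col_py : Prop := ∀ (text : String) (pos : Int), Dom_get_line_col_py text pos → Spec_get_line_col_py text pos (get_line_col_py text pos)

-- ===== LEMMAS AND PROOFS =====

-- once pos is below the enumeration index, no later start i+1 can be ≤ pos, so the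
-- search over the remaining starts leaves `line` unchanged
theorem pvFindLine_stops (pos : Int) (l : List Char) (i line : Int) (h : pos ≤ i) :
    pvFindLine pos (pvBuildStarts l i) line = line := by
  induction l generalizing i line with
  | nil => rfl
  | cons c r ih =>
    simp only [pvBuildStarts]
    split
    · simp only [pvFindLine, if_pos (by omega : pos < i + 1)]
    · exact ih (i + 1) line (by omega)

theorem pvFindLine_ge (pos : Int) (S : List Int) (line : Int) :
    line ≤ pvFindLine pos S line := by
  induction S generalizing line with
  | nil => exact le_refl _
  | cons s rest ih =>
    simp only [pvFindLine]
    split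
    · exact le_refl _
    · exact le_trans (by omega) (ih (line + 1))

-- line number: A's search over the built starts equals the first component of B's scan
theorem line_eq (pos : Int) (l : List Char) (i line last : Int) :
    pvFindLine pos (pvBuildStarts l i) line = (pvScan pos l i line last).1 := by
  induction l generalizing i line last with
  | nil => rfl
  | cons c r ih =>
    simp only [pvBuildStarts, pvScan]
    by_cases h : pos ≤ i
    · rw [if_pos h]
      split
      · simp only [pvFindLine, if_pos (by omega : pos < i + 1)]
      · exact pvFindLine_stops pos r (i + 1) line (by omega)
    · rw [if_neg h]
      split
      · simp only [pvFindLine, if_neg (by omega : ¬ pos < i + 1)]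
        exact ih (i + 1) (line + 1) (i + 1)
      · exact ih (i + 1) line last

-- indexing a cons at a positive index drops the head
theorem pyGet?_cons_of_pos (a : Int) (l : List Int) (n : Int) (h : 1 ≤ n) :
    PySem.List.pyGet? (a :: l) n = PySem.List.pyGet? l (n - 1) := by
  have h1 : n - 1 = (((n.toNat - 1 : Nat) : Int)) := by omega
  rw [h1, PySem.List.pyGet?_natCast]
  have h0 : n = ((n.toNat : Int)) := by omega
  nth_rewrite 1 [h0]
  rw [PySem.List.pyGet?_natCast]
  obtain ⟨m, hm⟩ : ∃ m, n.toNat = m + 1 := ⟨n.toNat - 1, by omega⟩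
  simp [hm]

-- last line start: A's line_starts[line-1] equals the second component of B's scan
theorem last_eq (pos : Int) (l : List Char) (i d line : Int) :
    (PySem.List.pyGet? (d :: pvBuildStarts l i)
        (pvFindLine pos (pvBuildStarts l i) line - line)).getD 0
      = (pvScan pos l i line d).2 := by
  induction l generalizing i d line with
  | nil =>
    simp [pvBuildStarts, pvFindLine, pvScan]
  | cons c r ih =>
    simp only [pvBuildStarts, pvScan]
    by_cases h : pos ≤ i
    · rw [if_pos h]
      split
      · have hf : pvFindLine pos ((i + 1) :: pvBuildStarts r (i + 1)) line = line := by
          simp only [pvFindLine, if_pos (show pos < i + 1 by omega)]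
        rw [hf]
        simp [PySem.List.pyGet?_zero_cons]
      · rw [pvFindLine_stops pos r (i + 1) line (by omega)]
        simp
    · rw [if_neg h]
      split
      · simp only [pvFindLine, if_neg (by omega : ¬ pos < i + 1)]
        have hge := pvFindLine_ge pos (pvBuildStarts r (i + 1)) (line + 1)
        rw [pyGet?_cons_of_pos _ _ _ (by omega)]
        have : pvFindLine pos (pvBuildStarts r (i + 1)) (line + 1) - line - 1
            = pvFindLine pos (pvBuildStarts r (i + 1)) (line + 1) - (line + 1) := by omega
        rw [this]
        exact ih (i + 1) (i + 1) (line + 1)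
      · exact ih (i + 1) d line

-- ===== VERDICT (by name: the statement is the Claim_ definition above) =====
theorem get_line_col_py_spec : Claim_equal_get_line_col_py := by
  intro text pos _
  unfold Spec_get_line_col_py get_line_col_py get_line_col_py_alt
  refine Prod.ext ?_ ?_
  · exact line_eq pos text.toList 0 1 0
  · simp only []
    rw [last_eq pos text.toList 0 0 1]
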